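-- pv_equiv track=rewrite | github.com/sundaycat/Leetcode-Practice | legacy/Interview Preparation/TopicOccurenceInReview.py | find_topic_occur_in_review_1
-- ===== SOURCE A (Python) =====
-- def find_topic_occur_in_review_1(topics, reviews):
--
--     rs = {}
--     for review in reviews:
--
--         # iterate over each topic: Price, Business Specialties, Harry Shrub
--         for topic in topics.keys():
--             # iterate over keywords under each topic, EX Price: cheap, expensive, price
--             for keyword in topics[topic]:
--                 # if any of the keywords appear in current review, record it and move to next topic
--                 if keyword in review.lower():
--
--                     if topic not in rs:
--                         rs[topic] = 1
--                     else:
--                         rs[topic] += 1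
--
--                     break
--
--     return rs
-- ===== SOURCE B (Python) =====
-- def find_topic_occur_in_review_1(topics, reviews):
--     # Invert once: keyword -> positions of the topics that list it (duplicates collapse),
--     # then per review lowercase once and scan the distinct keywords, collecting hit
--     # topic positions in a set and counting them in topic order.
--     names = list(topics)
--     kw2topics = {}
--     for i, kws in enumerate(topics.values()):
--         for k in kws:
--             kw2topics.setdefault(k, []).append(i)
--     rs = {}
--     for review in reviews:
--         r = review.lower()
--         hit = set()
--         for k, ts in kw2topics.items():
--             if k in r:
--                 hit.update(ts)
--         for i in sorted(hit):
--             t = names[i]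
--             rs[t] = rs.get(t, 0) + 1
--     return rs
-- ===== Notes on version B (the rewrite author's own statement) =====
-- stated objective: faster
-- what changed: B inverts the topics dict once into a keyword->topic-positions map (collapsing duplicate keywords), then per review lowercases once and makes a single flat scan over the distinct keywords, collecting hit topic positions in a set and counting them in topic order, instead of A's triple-nested loop with break that recomputes review.lower() for every keyword test.
import Mathlib
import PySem

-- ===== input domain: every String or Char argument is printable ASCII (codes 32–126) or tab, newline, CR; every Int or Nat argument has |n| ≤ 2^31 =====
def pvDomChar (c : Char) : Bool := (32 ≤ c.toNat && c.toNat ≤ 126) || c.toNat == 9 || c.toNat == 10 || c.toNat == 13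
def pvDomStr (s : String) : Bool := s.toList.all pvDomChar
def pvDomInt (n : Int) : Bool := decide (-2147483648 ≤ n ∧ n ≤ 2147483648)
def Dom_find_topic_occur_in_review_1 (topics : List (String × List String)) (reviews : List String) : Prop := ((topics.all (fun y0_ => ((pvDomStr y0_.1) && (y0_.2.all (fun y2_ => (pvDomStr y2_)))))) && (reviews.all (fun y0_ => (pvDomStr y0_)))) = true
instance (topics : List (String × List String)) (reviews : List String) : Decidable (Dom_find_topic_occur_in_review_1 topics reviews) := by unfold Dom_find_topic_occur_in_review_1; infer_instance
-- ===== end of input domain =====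

-- B inverts the topics dict once into a keyword->topic-positions map and per review lowercases once
-- and scans the distinct keywords, collecting hit topics in a set, instead of A's triple-nested loop
-- with break that recomputes review.lower() per keyword test.


-- ===== PORT A =====
-- inner 'for keyword in topics[topic]: if keyword in review.lower(): <update>; break'
def pvLoopKwA (review topic : String) (rs : PySem.Dict String Int) : List String → PySem.Dict String Int
  | [] => rs
  | k :: ks =>
    if PySem.Str.isIn k (PySem.Str.lower review) then
      (if rs.contains topic = false then rs.insert topic 1 else rs.modify topic 0 (· + 1))
    else pvLoopKwA review topic rs ks

def find_topic_occur_in_review_1 (topics : List (String × List String)) (reviews : List String) : List (String × Int) :=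
  let td := PySem.Dict.ofList topics
  (reviews.foldl (fun rs review =>
      td.keys.foldl (fun rs topic => pvLoopKwA review topic rs (td.getD topic [])) rs)
    PySem.Dict.empty).items

-- ===== PORT B =====
-- kw2topics = {}; for i, kws in enumerate(topics.values()): for k in kws: kw2topics.setdefault(k, []).append(i)
def pvIndexB (td : PySem.Dict String (List String)) : PySem.Dict String (List Int) :=
  (PySem.List.enumerate td.values 0).foldl
    (fun ix p => p.2.foldl (fun ix k => ix.modify k [] (· ++ [p.1])) ix)
    PySem.Dict.empty

-- hit = set(); for k, ts in kw2topics.items(): if k in r: hit.update(ts)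
def pvHitB (ix : PySem.Dict String (List Int)) (r : String) : PySem.Set Int :=
  ix.items.foldl (fun h p => if PySem.Str.isIn p.1 r then PySem.Set.update h p.2 else h)
    PySem.Set.empty

-- one review: r = review.lower(); <hit>; for i in sorted(hit): t = names[i]; rs[t] = rs.get(t, 0) + 1
def pvStepB (names : List String) (ix : PySem.Dict String (List Int))
    (rs : PySem.Dict String Int) (review : String) : PySem.Dict String Int :=
  (PySem.List.sorted (pvHitB ix (PySem.Str.lower review)) (fun x => x)).foldl
    (fun rs i =>
      match PySem.List.pyGet? names i with
      | some t => rs.insert t (rs.getD t 0 + 1)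
      | none => rs)  -- unreachable guard: every index in hit is a valid position in names
    rs

def find_topic_occur_in_review_1_alt (topics : List (String × List String)) (reviews : List String) : List (String × Int) :=
  let td := PySem.Dict.ofList topics
  let ix := pvIndexB td
  (reviews.foldl (pvStepB td.keys ix) PySem.Dict.empty).items

-- ===== PRECONDITION & SPEC =====
def Spec_find_topic_occur_in_review_1 (topics : List (String × List String)) (reviews : List String) (out : List (String × Int)) : Prop := out = find_topic_occur_in_review_1_alt topics reviews
instance (topics : List (String × List String)) (reviews : List String) (out : List (String × Int)) : Decidable (Spec_find_topic_occur_in_review_1 topics reviews out) := by unfold Spec_find_topic_occur_in_review_1; infer_instance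

-- ===== CLAIM (what is proved, stated in full; the proofs are below) =====
def Claim_equal_find_topic_occur_in_review_1 : Prop := ∀ (topics : List (String × List String)) (reviews : List String), Dom_find_topic_occur_in_review_1 topics reviews → Spec_find_topic_occur_in_review_1 topics reviews (find_topic_occur_in_review_1 topics reviews)

-- ===== LEMMAS AND PROOFS =====

-- the topics a review matches, in topic order (proof-side characterisation of both per-review steps)
def pvMatched (td : PySem.Dict String (List String)) (review : String) : List String :=
  (td.items.filter (fun p => p.2.any (fun k => PySem.Str.isIn k (PySem.Str.lower review)))).map (·.1)

-- A's keyword loop with break is "if any keyword matches, bump once"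
theorem pvLoopKwA_eq_any (review topic : String) (rs : PySem.Dict String Int) (ks : List String) :
    pvLoopKwA review topic rs ks =
      if ks.any (fun k => PySem.Str.isIn k (PySem.Str.lower review)) then
        (if rs.contains topic = false then rs.insert topic 1 else rs.modify topic 0 (· + 1))
      else rs := by
  induction ks with
  | nil => simp [pvLoopKwA]
  | cons k ks ih =>
    by_cases h : PySem.Chars.isIn k.toList (PySem.Chars.lower review.toList) = true
    · simp [pvLoopKwA, h]
    · simp [pvLoopKwA, h, ih]

-- A's bump is exactly B's counting step
theorem pv_bump_eq_insert (d : PySem.Dict String Int) (t : String) :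
    (if d.contains t = false then d.insert t 1 else d.modify t 0 (· + 1))
      = d.insert t (d.getD t 0 + 1) := by
  by_cases h : d.contains t = true
  · simp [h, PySem.Dict.modify]
  · have h' : d.contains t = false := by simpa using h
    simp [PySem.Dict.getD_of_not_contains, h']

-- A's per-review topic loop bumps exactly the matched topics of that review, in topic order
theorem pv_review_stepA (td : PySem.Dict String (List String)) (hnd : td.keys.Nodup)
    (review : String) (rs : PySem.Dict String Int) :
    td.keys.foldl (fun rs topic => pvLoopKwA review topic rs (td.getD topic [])) rs
      = (pvMatched td review).foldl (fun d t => d.insert t (d.getD t 0 + 1)) rs := by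
  have h1 : td.keys.foldl (fun rs topic => pvLoopKwA review topic rs (td.getD topic [])) rs
      = td.keys.foldl (fun rs topic =>
          if (td.getD topic []).any (fun k => PySem.Str.isIn k (PySem.Str.lower review)) then
            rs.insert topic (rs.getD topic 0 + 1) else rs) rs := by
    apply PySem.List.foldl_congr_mem
    intro acc t _
    rw [pvLoopKwA_eq_any, pv_bump_eq_insert]
  rw [h1, PySem.List.foldl_if_eq_foldl_filter]
  congr 1
  unfold pvMatched
  rw [PySem.Dict.items_eq_map_keys td hnd ([] : List String), List.filter_map, List.map_map]
  simp [Function.comp_def]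

-- the flattened (keyword, topic-position) pairs B's index loop inserts
def pvPairs (td : PySem.Dict String (List String)) : List (String × Int) :=
  (PySem.List.enumerate td.values 0).flatMap (fun p => p.2.map (fun k => (k, p.1)))

theorem pvIndexB_eq_pairs_fold (td : PySem.Dict String (List String)) :
    pvIndexB td = (pvPairs td).foldl (fun d p => d.modify p.1 [] (· ++ [p.2])) PySem.Dict.empty := by
  unfold pvIndexB pvPairs
  rw [List.foldl_flatMap]
  apply PySem.List.foldl_congr_mem
  intro acc p _
  rw [List.foldl_map]

theorem pv_nodup_indexB_keys (td : PySem.Dict String (List String)) :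
    (pvIndexB td).keys.Nodup := by
  rw [pvIndexB_eq_pairs_fold]
  exact PySem.Dict.nodup_keys_foldl_modify_key _ (fun p : String × Int => p.1)
    _ _ _ (by simp [PySem.Dict.keys_empty])

theorem pv_mem_indexB_getD (td : PySem.Dict String (List String)) (k : String) (x : Int) :
    x ∈ (pvIndexB td).getD k [] ↔ ∃ p ∈ PySem.List.enumerate td.values 0, p.1 = x ∧ k ∈ p.2 := by
  rw [pvIndexB_eq_pairs_fold, PySem.Dict.getD_foldl_modify_append]
  simp [pvPairs, List.mem_flatMap, List.mem_filter]

theorem pv_mem_indexB_keys (td : PySem.Dict String (List String)) (k : String) :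
    k ∈ (pvIndexB td).keys ↔ ∃ p ∈ PySem.List.enumerate td.values 0, k ∈ p.2 := by
  rw [pvIndexB_eq_pairs_fold,
    PySem.Dict.keys_foldl_modify_key (key := fun p : String × Int => p.1)]
  simp [pvPairs, PySem.Set.mem_update, PySem.Dict.keys_empty]

theorem pv_hit_aux (r : String) (l : List (String × List Int)) (h0 : PySem.Set Int) (x : Int) :
    x ∈ l.foldl (fun h p => if PySem.Str.isIn p.1 r then PySem.Set.update h p.2 else h) h0 ↔
      x ∈ h0 ∨ ∃ p ∈ l, PySem.Str.isIn p.1 r = true ∧ x ∈ p.2 := by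
  induction l generalizing h0 with
  | nil => simp
  | cons a l ih =>
    simp only [List.foldl_cons, ih, List.mem_cons]
    rcases hc : PySem.Chars.isIn a.1.toList r.toList with _ | _
    · simp [PySem.Str.isIn, hc]
    · simp [PySem.Str.isIn, hc, PySem.Set.mem_update]
      tauto

theorem pv_nodup_aux (r : String) (l : List (String × List Int)) (h0 : PySem.Set Int)
    (hn : h0.Nodup) :
    (l.foldl (fun h p => if PySem.Str.isIn p.1 r then PySem.Set.update h p.2 else h) h0).Nodup := by
  induction l generalizing h0 with
  | nil => exact hn
  | cons a l ih =>
    simp only [List.foldl_cons]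
    split
    · exact ih _ (PySem.Set.nodup_update _ _ hn)
    · exact ih _ hn

theorem pv_mem_hitB (ix : PySem.Dict String (List Int)) (r : String) (x : Int) :
    x ∈ pvHitB ix r ↔ ∃ p ∈ ix.items, PySem.Str.isIn p.1 r = true ∧ x ∈ p.2 := by
  unfold pvHitB
  rw [pv_hit_aux]
  simp [PySem.Set.empty]

theorem pv_nodup_hitB (ix : PySem.Dict String (List Int)) (r : String) :
    (pvHitB ix r).Nodup := pv_nodup_aux _ _ _ (by simp [PySem.Set.empty])

-- enumerate over a mapped list
theorem pv_enumerate_map {α β : Type} (g : α → β) (xs : List α) (s : Int) :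
    PySem.List.enumerate (xs.map g) s = (PySem.List.enumerate xs s).map (fun p => (p.1, g p.2)) := by
  induction xs generalizing s with
  | nil => simp [PySem.List.enumerate_nil]
  | cons x xs ih => simp [PySem.List.enumerate_cons, ih]

-- the hit set holds exactly the positions of matched topics
theorem pv_hitB_char (td : PySem.Dict String (List String)) (review : String) (x : Int) :
    x ∈ pvHitB (pvIndexB td) (PySem.Str.lower review) ↔
      ∃ p ∈ PySem.List.enumerate td.values 0, p.1 = x ∧
        p.2.any (fun k => PySem.Str.isIn k (PySem.Str.lower review)) = true := by
  rw [pv_mem_hitB]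
  constructor
  · rintro ⟨⟨qk, qv⟩, hq, hin, hx⟩
    have hgd : (pvIndexB td).getD qk [] = qv :=
      PySem.Dict.getD_of_mem_items _ hq (pv_nodup_indexB_keys td) []
    obtain ⟨p, hp, hpx, hsp⟩ := (pv_mem_indexB_getD td qk x).mp (hgd ▸ hx)
    exact ⟨p, hp, hpx, List.any_eq_true.mpr ⟨qk, hsp, hin⟩⟩
  · rintro ⟨p, hp, hpx, hany⟩
    obtain ⟨k, hkp, hkin⟩ := List.any_eq_true.mp hany
    have hkeys : k ∈ (pvIndexB td).keys := (pv_mem_indexB_keys td k).mpr ⟨p, hp, hkp⟩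
    refine ⟨(k, (pvIndexB td).getD k []), ?_, hkin, ?_⟩
    · have hc : (pvIndexB td).contains k = true :=
        (PySem.Dict.contains_iff_mem_keys _ _).mpr hkeys
      obtain ⟨v, hv⟩ : ∃ v, (pvIndexB td).get? k = some v := by
        rcases hq : (pvIndexB td).get? k with _ | v
        · exact absurd ((PySem.Dict.get?_eq_none_iff_contains _ _).mp hq) (by simp [hc])
        · exact ⟨v, rfl⟩
      have := PySem.Dict.mem_items_of_get?_eq_some _ hv
      simpa [PySem.Dict.getD_of_get?_eq_some _ ([] : List Int) hv] using this
    · exact (pv_mem_indexB_getD td k x).mpr ⟨p, hp, hpx, hkp⟩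

-- B's per-review loop bumps exactly the matched topics of that review, in topic order
theorem pv_review_stepB (td : PySem.Dict String (List String)) (rs : PySem.Dict String Int)
    (review : String) :
    pvStepB td.keys (pvIndexB td) rs review
      = (pvMatched td review).foldl (fun d t => d.insert t (d.getD t 0 + 1)) rs := by
  unfold pvStepB
  set f : String → Bool := fun k => PySem.Str.isIn k (PySem.Str.lower review) with hf
  have he : PySem.List.enumerate td.values 0
      = (PySem.List.enumerate td.items 0).map (fun p => (p.1, p.2.2)) := by
    rw [show td.values = td.items.map (·.2) from rfl, pv_enumerate_map]
  have pw : (((PySem.List.enumerate td.items 0).filter (fun q => q.2.2.any f)).map (·.1)).Pairwise (· < ·) := by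
    rw [List.pairwise_map]
    exact (PySem.List.pairwise_lt_enumerate td.items 0).sublist List.filter_sublist
  have nd1 : (((PySem.List.enumerate td.items 0).filter (fun q => q.2.2.any f)).map (·.1)).Nodup :=
    pw.imp ne_of_lt
  have hmem : ∀ a : Int,
      a ∈ ((PySem.List.enumerate td.items 0).filter (fun q => q.2.2.any f)).map (·.1) ↔
      a ∈ pvHitB (pvIndexB td) (PySem.Str.lower review) := by
    intro a
    rw [pv_hitB_char td review a, he]
    simp only [List.mem_map, List.mem_filter]
    constructor
    · rintro ⟨q, ⟨hq, h2⟩, h1⟩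
      exact ⟨(q.1, q.2.2), ⟨q, hq, rfl⟩, h1, h2⟩
    · rintro ⟨p, ⟨q, hq, rfl⟩, h1, h2⟩
      exact ⟨q, ⟨hq, h2⟩, h1⟩
  have hperm : (((PySem.List.enumerate td.items 0).filter (fun q => q.2.2.any f)).map (·.1)).Perm
      (pvHitB (pvIndexB td) (PySem.Str.lower review)) :=
    (List.perm_ext_iff_of_nodup nd1 (pv_nodup_hitB _ _)).mpr hmem
  rw [PySem.List.sorted_eq_of_perm_of_pairwise_lt _ _ _ hperm pw]
  rw [List.foldl_map]
  have hfold :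
      ((PySem.List.enumerate td.items 0).filter (fun q => q.2.2.any f)).foldl
        (fun rs q => match PySem.List.pyGet? td.keys q.1 with
          | some t => rs.insert t (rs.getD t 0 + 1)
          | none => rs) rs
      = ((PySem.List.enumerate td.items 0).filter (fun q => q.2.2.any f)).foldl
          (fun rs q => rs.insert q.2.1 (rs.getD q.2.1 0 + 1)) rs := by
    apply PySem.List.foldl_congr_mem
    intro acc q hq
    have hq' := List.mem_of_mem_filter hq
    obtain ⟨n, hn, rfl⟩ := (PySem.List.mem_enumerate_iff _ _ _).mp hq'
    have h0 : ((0 : Int) + (n : Int)) = ((n : Nat) : Int) := by omega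
    rw [h0, PySem.List.pyGet?_natCast]
    rw [show td.keys = td.items.map (·.1) from rfl]
    simp [List.getElem?_eq_getElem (by simpa using hn)]
  rw [hfold]
  unfold pvMatched
  have hsplit : td.items.filter (fun p => p.2.any f)
      = ((PySem.List.enumerate td.items 0).filter (fun q => q.2.2.any f)).map (·.2) := by
    conv_lhs => rw [← PySem.List.map_snd_enumerate td.items 0]
    rw [List.filter_map]
    rfl
  rw [hsplit, List.map_map, List.foldl_map]
  rfl

-- ===== VERDICT (by name: the statement is the Claim_ definition above) =====
theorem find_topic_occur_in_review_1_spec : Claim_equal_find_topic_occur_in_review_1 := by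
  intro topics reviews _
  unfold Spec_find_topic_occur_in_review_1 find_topic_occur_in_review_1 find_topic_occur_in_review_1_alt
  have hnd : (PySem.Dict.ofList topics).keys.Nodup := PySem.Dict.nodup_keys_ofList topics
  have hstep : ∀ (rs : PySem.Dict String Int) (review : String),
      (PySem.Dict.ofList topics).keys.foldl
        (fun rs topic => pvLoopKwA review topic rs ((PySem.Dict.ofList topics).getD topic [])) rs
      = pvStepB (PySem.Dict.ofList topics).keys (pvIndexB (PySem.Dict.ofList topics)) rs review := by
    intro rs review
    rw [pv_review_stepA _ hnd review rs, pv_review_stepB]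
  simp only [hstep]
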